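-- pv_equiv track=rewrite | github.com/SG5/1C-python | solution.py | get_ships_amount
-- ===== SOURCE A (Python) =====
-- from collections import defaultdict
--
-- def get_ships_amount(field):
--     ships_dots = defaultdict(lambda: defaultdict(lambda: None))
--
--     def get_closest_ship(x, y):
--         if ships_dots[x+1][y]:
--             return ships_dots[x+1][y]
--         if ships_dots[x-1][y]:
--             return ships_dots[x-1][y]
--         if ships_dots[x][y+1]:
--             return ships_dots[x][y+1]
--         if ships_dots[x][y-1]:
--             return ships_dots[x][y-1]
--         return x,y
--
--     for x in range(len(field)):
--         for y in range(len(field[x])):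
--             if field[x][y] == 0:
--                 continue
--             shipX, shipY = get_closest_ship(x,y)
--             ships_dots[x][y] = (shipX, shipY)
--
--     ships = set()
--     for (_, row) in ships_dots.items():
--         for (_, point) in row.items():
--             if point is not None and point not in ships:
--                 ships.add(point)
--
--     return len(ships)
-- ===== SOURCE B (Python) =====
-- def get_ships_amount(field):
--     cells = {(x, y)
--              for x in range(len(field))
--              for y in range(len(field[x]))
--              if field[x][y] != 0}
--     return sum(1 for (x, y) in cells
--                if (x - 1, y) not in cells and (x, y - 1) not in cells)
-- ===== Notes on version B (the rewrite author's own statement) =====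
-- stated objective: simpler
-- what changed: Replaces A's label-propagation through a nested defaultdict (closest-ship lookups, stored root coordinates, final distinct-label tally) with a two-line corner count: collect the set of nonzero coordinates and count those with no nonzero cell directly above or to the left.
import Mathlib
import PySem

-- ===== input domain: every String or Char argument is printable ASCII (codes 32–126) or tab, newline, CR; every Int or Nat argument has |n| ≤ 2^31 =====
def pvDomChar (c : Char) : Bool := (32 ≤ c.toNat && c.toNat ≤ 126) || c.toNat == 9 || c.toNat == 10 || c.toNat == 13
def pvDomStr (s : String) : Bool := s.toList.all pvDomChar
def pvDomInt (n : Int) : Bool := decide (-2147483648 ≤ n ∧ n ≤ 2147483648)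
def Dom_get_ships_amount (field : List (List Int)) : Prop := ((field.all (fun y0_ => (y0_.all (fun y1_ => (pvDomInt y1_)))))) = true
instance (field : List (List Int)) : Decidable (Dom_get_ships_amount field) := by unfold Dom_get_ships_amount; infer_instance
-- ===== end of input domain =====

-- B replaces A's label-propagation dict with a corner count over the set of nonzero cells (objective: simpler).

-- ===== PORT A =====
-- ships_dots (a defaultdict of defaultdicts with default None) is modelled as a nested Dict storing only
-- the ASSIGNED (non-None) points: a missing entry is Python's None.  The defaultdict probes made by
-- get_closest_ship create None-valued entries in the real dict; omitting them is exact because the final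
-- loop skips None points and the result is the size of a set, insensitive to extra None entries and to
-- iteration order.
def pvProbe (d : PySem.Dict Int (PySem.Dict Int (Int × Int))) (x y : Int) : Option (Int × Int) :=
  PySem.Dict.get? (PySem.Dict.getD d x PySem.Dict.empty) y

-- get_closest_ship(x, y); stored points are tuples, hence truthy exactly when assigned
def pvClosest (d : PySem.Dict Int (PySem.Dict Int (Int × Int))) (x y : Int) : Int × Int :=
  match pvProbe d (x + 1) y with
  | some p => p
  | none =>
    match pvProbe d (x - 1) y with
    | some p => p
    | none =>
      match pvProbe d x (y + 1) with
      | some p => p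
      | none =>
        match pvProbe d x (y - 1) with
        | some p => p
        | none => (x, y)

-- ships_dots[x][y] = p
def pvStore (d : PySem.Dict Int (PySem.Dict Int (Int × Int))) (x y : Int) (p : Int × Int) :
    PySem.Dict Int (PySem.Dict Int (Int × Int)) :=
  d.insert x ((d.getD x PySem.Dict.empty).insert y p)

def get_ships_amount (field : List (List Int)) : Int :=
  let d := (PySem.List.pyRange 0 (PySem.List.len field) 1).foldl (fun d x =>
    let row := PySem.List.pyGetD field x []   -- x comes from range(len(field)), so it is in range
    (PySem.List.pyRange 0 (PySem.List.len row) 1).foldl (fun d y =>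
      if PySem.List.pyGetD row y 0 = 0 then d
      else pvStore d x y (pvClosest d x y)) d) PySem.Dict.empty
  -- ships = set(); 'if point is not None and point not in ships: ships.add(point)' is Set.add
  let ships := d.items.foldl (fun s xr =>
    xr.2.items.foldl (fun s yp => PySem.Set.add s yp.2) s) PySem.Set.empty
  PySem.Set.len ships

-- ===== PORT B =====
def get_ships_amount_alt (field : List (List Int)) : Int :=
  let cells : PySem.Set (Int × Int) := PySem.Set.ofList
    ((PySem.List.pyRange 0 (PySem.List.len field) 1).flatMap (fun x =>
      (PySem.List.pyRange 0 (PySem.List.len (PySem.List.pyGetD field x [])) 1).filterMap (fun y =>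
        if PySem.List.pyGetD (PySem.List.pyGetD field x []) y 0 ≠ 0 then some (x, y) else none)))
  -- sum(1 for (x, y) in cells if ...): a count over the set, insensitive to iteration order
  ((cells.countP (fun c =>
      !(PySem.Set.contains cells (c.1 - 1, c.2)) && !(PySem.Set.contains cells (c.1, c.2 - 1)))) : Int)

-- ===== PRECONDITION & SPEC =====
def Spec_get_ships_amount (field : List (List Int)) (out : Int) : Prop := out = get_ships_amount_alt field
instance (field : List (List Int)) (out : Int) : Decidable (Spec_get_ships_amount field out) := by unfold Spec_get_ships_amount; infer_instance

-- ===== CLAIM (what is proved, stated in full; the proofs are below) =====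
def Claim_equal_get_ships_amount : Prop := ∀ (field : List (List Int)), Dom_get_ships_amount field → Spec_get_ships_amount field (get_ships_amount field)

-- ===== LEMMAS AND PROOFS =====

-- a coordinate holding a nonzero (ship) value
def pvCell (field : List (List Int)) (c : Int × Int) : Bool :=
  decide (0 ≤ c.1) && decide (c.1 < PySem.List.len field) &&
  decide (0 ≤ c.2) && decide (c.2 < PySem.List.len (PySem.List.pyGetD field c.1 [])) &&
  (PySem.List.pyGetD (PySem.List.pyGetD field c.1 []) c.2 0 != 0)

-- the coordinates A's nested loop visits, in row-major order
def pvCoords (field : List (List Int)) : List (Int × Int) :=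
  (PySem.List.pyRange 0 (PySem.List.len field) 1).flatMap (fun x =>
    (PySem.List.pyRange 0 (PySem.List.len (PySem.List.pyGetD field x [])) 1).map (fun y => (x, y)))

-- the root A's propagation converges to: follow the up-neighbour, else the left-neighbour
def pvRoot (field : List (List Int)) : Nat → Int → Int → Int × Int
  | 0, x, y => (x, y)
  | n + 1, x, y =>
    if pvCell field (x - 1, y) then pvRoot field n (x - 1) y
    else if pvCell field (x, y - 1) then pvRoot field n x (y - 1)
    else (x, y)

def pvRootC (field : List (List Int)) (x y : Int) : Int × Int := pvRoot field (x + y).toNat x y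

-- row-major order on coordinates
def pvLex (a b : Int × Int) : Prop := a.1 < b.1 ∨ (a.1 = b.1 ∧ a.2 < b.2)

-- the body of A's nested loop as a function of the visited coordinate
def pvStep (field : List (List Int)) (d : PySem.Dict Int (PySem.Dict Int (Int × Int)))
    (c : Int × Int) : PySem.Dict Int (PySem.Dict Int (Int × Int)) :=
  if PySem.List.pyGetD (PySem.List.pyGetD field c.1 []) c.2 0 = 0 then d
  else pvStore d c.1 c.2 (pvClosest d c.1 c.2)


-- membership facts
lemma pvCell_iff (field : List (List Int)) (c : Int × Int) :
    pvCell field c = true ↔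
      0 ≤ c.1 ∧ c.1 < PySem.List.len field ∧ 0 ≤ c.2 ∧
      c.2 < PySem.List.len (PySem.List.pyGetD field c.1 []) ∧
      PySem.List.pyGetD (PySem.List.pyGetD field c.1 []) c.2 0 ≠ 0 := by
  simp [pvCell, and_assoc]

lemma pvCell_fst_neg (field : List (List Int)) (c : Int × Int) (h : c.1 < 0) :
    pvCell field c = false := by
  simp [pvCell]; intro h1; omega

lemma pvCell_snd_neg (field : List (List Int)) (c : Int × Int) (h : c.2 < 0) :
    pvCell field c = false := by
  simp [pvCell]; intro _ _ h1; omega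

lemma mem_pvCoords (field : List (List Int)) (c : Int × Int) :
    c ∈ pvCoords field ↔
      0 ≤ c.1 ∧ c.1 < PySem.List.len field ∧ 0 ≤ c.2 ∧
      c.2 < PySem.List.len (PySem.List.pyGetD field c.1 []) := by
  obtain ⟨x, y⟩ := c
  simp only [pvCoords, List.mem_flatMap, List.mem_map, PySem.List.mem_pyRange_one]
  constructor
  · rintro ⟨x', hx', y', hy', h⟩
    obtain ⟨rfl, rfl⟩ : x' = x ∧ y' = y := by
      constructor <;> [exact congrArg Prod.fst h; exact congrArg Prod.snd h]
    exact ⟨hx'.1, hx'.2, hy'.1, hy'.2⟩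
  · rintro ⟨h1, h2, h3, h4⟩
    exact ⟨x, ⟨h1, h2⟩, y, ⟨h3, h4⟩, rfl⟩

lemma pvCell_mem_coords (field : List (List Int)) (c : Int × Int) (h : pvCell field c = true) :
    c ∈ pvCoords field := by
  rw [pvCell_iff] at h
  exact (mem_pvCoords field c).2 ⟨h.1, h.2.1, h.2.2.1, h.2.2.2.1⟩

lemma pvCoords_pairwise (field : List (List Int)) : (pvCoords field).Pairwise pvLex := by
  unfold pvCoords
  apply List.pairwise_flatMap.2
  refine ⟨fun x _ => ?_, ?_⟩
  · exact (PySem.List.pairwise_lt_pyRange_one 0 _).map _ (fun a b h => Or.inr ⟨rfl, h⟩)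
  · refine (PySem.List.pairwise_lt_pyRange_one 0 (PySem.List.len field)).imp ?_
    intro a b hab p hp q hq
    simp only [List.mem_map] at hp hq
    obtain ⟨_, _, rfl⟩ := hp
    obtain ⟨_, _, rfl⟩ := hq
    exact Or.inl hab

-- probe facts
lemma pvProbe_empty (x y : Int) : pvProbe PySem.Dict.empty x y = none := by
  simp [pvProbe, PySem.Dict.getD_empty, PySem.Dict.get?_empty]

lemma pvProbe_store (d : PySem.Dict Int (PySem.Dict Int (Int × Int))) (x y : Int) (p : Int × Int)
    (x' y' : Int) :
    pvProbe (pvStore d x y p) x' y' =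
      if x' = x ∧ y' = y then some p else pvProbe d x' y' := by
  unfold pvProbe pvStore
  rw [PySem.Dict.getD_insert]
  by_cases hx : x' = x
  · subst hx
    rw [if_pos rfl, PySem.Dict.get?_insert]
    by_cases hy : y' = y <;> simp [hy]
  · simp [hx]


-- fuel irrelevance for pvRoot
lemma pvRoot_succ (field : List (List Int)) :
    ∀ n (x y : Int), 0 ≤ x → 0 ≤ y → (x + y).toNat ≤ n →
      pvRoot field (n + 1) x y = pvRoot field n x y := by
  intro n
  induction n with
  | zero =>
    intro x y hx hy hn
    obtain ⟨rfl, rfl⟩ : x = 0 ∧ y = 0 := by omega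
    have hA : pvCell field (-1, (0:Int)) = false := pvCell_fst_neg field _ (by norm_num)
    have hB : pvCell field ((0:Int), -1) = false := pvCell_snd_neg field _ (by norm_num)
    show (if pvCell field ((0:Int) - 1, 0) = true then pvRoot field 0 (0 - 1) 0
      else if pvCell field ((0:Int), 0 - 1) = true then pvRoot field 0 0 (0 - 1)
      else ((0:Int), (0:Int))) = ((0:Int), (0:Int))
    rw [if_neg (by simp [hA]), if_neg (by simp [hB])]
  | succ n ih =>
    intro x y hx hy hn
    show (if pvCell field (x - 1, y) = true then pvRoot field (n + 1) (x - 1) y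
      else if pvCell field (x, y - 1) = true then pvRoot field (n + 1) x (y - 1)
      else (x, y)) =
      (if pvCell field (x - 1, y) = true then pvRoot field n (x - 1) y
      else if pvCell field (x, y - 1) = true then pvRoot field n x (y - 1)
      else (x, y))
    by_cases h1 : pvCell field (x - 1, y) = true
    · rw [if_pos h1, if_pos h1]
      have hx1 : 0 ≤ x - 1 := by
        have := (pvCell_iff field (x - 1, y)).1 h1; exact this.1
      exact ih (x - 1) y hx1 hy (by omega)
    · rw [if_neg h1, if_neg h1]
      by_cases h2 : pvCell field (x, y - 1) = true
      · rw [if_pos h2, if_pos h2]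
        have hy1 : 0 ≤ y - 1 := by
          have := (pvCell_iff field (x, y - 1)).1 h2; exact this.2.2.1
        exact ih x (y - 1) hx hy1 (by omega)
      · rw [if_neg h2, if_neg h2]

lemma pvRoot_eq_rootC (field : List (List Int)) :
    ∀ n (x y : Int), 0 ≤ x → 0 ≤ y → (x + y).toNat ≤ n →
      pvRoot field n x y = pvRootC field x y := by
  intro n
  induction n with
  | zero =>
    intro x y hx hy hn
    unfold pvRootC
    congr 1
    omega
  | succ n ih =>
    intro x y hx hy hn
    by_cases h : (x + y).toNat ≤ n
    · rw [pvRoot_succ field n x y hx hy h]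
      exact ih x y hx hy h
    · have : (x + y).toNat = n + 1 := by omega
      unfold pvRootC
      rw [this]

-- the one-step recurrence A's closest-ship lookup realises
lemma pvRootC_rec (field : List (List Int)) (x y : Int) (hx : 0 ≤ x) (hy : 0 ≤ y) :
    pvRootC field x y =
      if pvCell field (x - 1, y) then pvRootC field (x - 1) y
      else if pvCell field (x, y - 1) then pvRootC field x (y - 1)
      else (x, y) := by
  by_cases h0 : (x + y).toNat = 0
  · obtain ⟨rfl, rfl⟩ : x = 0 ∧ y = 0 := by omega
    have hA : pvCell field (-1, (0:Int)) = false := pvCell_fst_neg field _ (by norm_num)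
    have hB : pvCell field ((0:Int), -1) = false := pvCell_snd_neg field _ (by norm_num)
    rw [if_neg (by simp [hA]), if_neg (by simp [hB])]
    rfl
  · obtain ⟨m, hm⟩ : ∃ m, (x + y).toNat = m + 1 := ⟨(x + y).toNat - 1, by omega⟩
    rw [pvRootC, hm, pvRoot]
    by_cases h1 : pvCell field (x - 1, y) = true
    · rw [if_pos h1, if_pos h1]
      have hx1 : 0 ≤ x - 1 := ((pvCell_iff field (x - 1, y)).1 h1).1
      exact pvRoot_eq_rootC field m (x - 1) y hx1 hy (by omega)
    · rw [if_neg h1, if_neg h1]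
      by_cases h2 : pvCell field (x, y - 1) = true
      · rw [if_pos h2, if_pos h2]
        have hy1 : 0 ≤ y - 1 := ((pvCell_iff field (x, y - 1)).1 h2).2.2.1
        exact pvRoot_eq_rootC field m x (y - 1) hx hy1 (by omega)
      · rw [if_neg h2, if_neg h2]

-- the root is a top-left corner, and a cell when the start is a cell
lemma pvRoot_props (field : List (List Int)) :
    ∀ n (x y : Int), 0 ≤ x → 0 ≤ y → (x + y).toNat ≤ n →
      pvCell field ((pvRoot field n x y).1 - 1, (pvRoot field n x y).2) = false ∧
      pvCell field ((pvRoot field n x y).1, (pvRoot field n x y).2 - 1) = false ∧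
      (pvCell field (x, y) = true → pvCell field (pvRoot field n x y) = true) := by
  intro n
  induction n with
  | zero =>
    intro x y hx hy hn
    obtain ⟨rfl, rfl⟩ : x = 0 ∧ y = 0 := by omega
    show pvCell field (((0:Int), (0:Int)).1 - 1, ((0:Int), (0:Int)).2) = false ∧
      pvCell field (((0:Int), (0:Int)).1, ((0:Int), (0:Int)).2 - 1) = false ∧
      (pvCell field (0, 0) = true → pvCell field ((0:Int), (0:Int)) = true)
    exact ⟨pvCell_fst_neg field _ (by norm_num), pvCell_snd_neg field _ (by norm_num), fun h => h⟩
  | succ n ih =>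
    intro x y hx hy hn
    rw [pvRoot]
    by_cases h1 : pvCell field (x - 1, y) = true
    · rw [if_pos h1]
      have h1' := (pvCell_iff field (x - 1, y)).1 h1
      have := ih (x - 1) y h1'.1 hy (by omega)
      exact ⟨this.1, this.2.1, fun _ => this.2.2 h1⟩
    · rw [if_neg h1]
      by_cases h2 : pvCell field (x, y - 1) = true
      · rw [if_pos h2]
        have h2' := (pvCell_iff field (x, y - 1)).1 h2
        have := ih x (y - 1) hx h2'.2.2.1 (by omega)
        exact ⟨this.1, this.2.1, fun _ => this.2.2 h2⟩
      · rw [if_neg h2]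
        exact ⟨by simpa using h1, by simpa using h2, fun h => h⟩

lemma pvRootC_corner (field : List (List Int)) (x y : Int) (h : pvCell field (x, y) = true) :
    pvCell field (pvRootC field x y) = true ∧
    pvCell field ((pvRootC field x y).1 - 1, (pvRootC field x y).2) = false ∧
    pvCell field ((pvRootC field x y).1, (pvRootC field x y).2 - 1) = false := by
  have hc := (pvCell_iff field (x, y)).1 h
  have := pvRoot_props field (x + y).toNat x y hc.1 hc.2.2.1 le_rfl
  exact ⟨this.2.2 h, this.1, this.2.1⟩

lemma pvRootC_fixed (field : List (List Int)) (x y : Int) (hx : 0 ≤ x) (hy : 0 ≤ y)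
    (h1 : pvCell field (x - 1, y) = false) (h2 : pvCell field (x, y - 1) = false) :
    pvRootC field x y = (x, y) := by
  rw [pvRootC_rec field x y hx hy, if_neg (by simp [h1]), if_neg (by simp [h2])]


lemma pvLex_asymm (a b : Int × Int) (h1 : pvLex a b) (h2 : pvLex b a) : False := by
  unfold pvLex at h1 h2; omega

lemma pvLex_irrefl (a : Int × Int) (h : pvLex a a) : False := by
  unfold pvLex at h; omega

-- the loop invariant: the dict holds exactly the processed nonzero cells, labelled with their root
def pvInv (field : List (List Int)) (d : PySem.Dict Int (PySem.Dict Int (Int × Int)))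
    (L : List (Int × Int)) : Prop :=
  ∀ x y : Int, pvProbe d x y =
    if pvCell field (x, y) = true ∧ (x, y) ∈ L then some (pvRootC field x y) else none

-- well-formedness: unique keys at both levels
def pvWf (d : PySem.Dict Int (PySem.Dict Int (Int × Int))) : Prop :=
  d.keys.Nodup ∧ ∀ x row, d.get? x = some row → row.keys.Nodup

lemma pvLoop (field : List (List Int)) :
    ∀ (R L : List (Int × Int)) d, pvCoords field = L ++ R →
      pvInv field d L → pvWf d →
      pvInv field (R.foldl (pvStep field) d) (pvCoords field) ∧
        pvWf (R.foldl (pvStep field) d) := by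
  intro R
  induction R with
  | nil =>
    intro L d h hInv hWf
    rw [List.append_nil] at h
    subst h
    exact ⟨hInv, hWf⟩
  | cons c R' ih =>
    intro L d h hInv hWf
    obtain ⟨x, y⟩ := c
    -- order facts at the split point
    have pwAll := pvCoords_pairwise field
    rw [h] at pwAll
    obtain ⟨pwL, pwCR, hcross⟩ := List.pairwise_append.1 pwAll
    have hcmem : (x, y) ∈ pvCoords field := by
      rw [h]; exact List.mem_append_right _ (List.mem_cons_self ..)
    have hmemL : ∀ a, a ∈ pvCoords field → pvLex a (x, y) → a ∈ L := by
      intro a ha hlex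
      rw [h] at ha
      rcases List.mem_append.1 ha with ha | ha
      · exact ha
      · rcases List.mem_cons.1 ha with rfl | ha
        · exact absurd hlex (fun hl => pvLex_irrefl _ hl)
        · exact absurd hlex (fun hl => pvLex_asymm _ _ ((List.pairwise_cons.1 pwCR).1 a ha) hl)
    have hnotinL : ∀ a, pvLex (x, y) a → a ∉ L := by
      intro a hlex haL
      exact pvLex_asymm _ _ (hcross a haL (x, y) (List.mem_cons_self ..)) hlex
    have hcnotL : (x, y) ∉ L := by
      intro hc
      exact pvLex_irrefl _ (hcross (x, y) hc (x, y) (List.mem_cons_self ..))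
    obtain ⟨hx, hxl, hy, hyl⟩ := (mem_pvCoords field (x, y)).1 hcmem
    have hcells : pvCell field (x, y) = true ↔
        PySem.List.pyGetD (PySem.List.pyGetD field x []) y 0 ≠ 0 := by
      rw [pvCell_iff]
      exact ⟨fun h' => h'.2.2.2.2, fun h' => ⟨hx, hxl, hy, hyl, h'⟩⟩
    have happ : pvCoords field = (L ++ [(x, y)]) ++ R' := by rw [h]; simp
    rw [List.foldl_cons]
    by_cases hz : PySem.List.pyGetD (PySem.List.pyGetD field x []) y 0 = 0
    · -- zero cell: the dict is unchanged
      have hstep : pvStep field d (x, y) = d := if_pos hz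
      rw [hstep]
      have hcf : ¬ pvCell field (x, y) = true := fun hc => (hcells.1 hc) hz
      refine ih (L ++ [(x, y)]) d happ ?_ hWf
      intro x' y'
      rw [hInv x' y']
      refine if_congr (and_congr_right fun hc' => ?_) rfl rfl
      simp only [List.mem_append, List.mem_singleton]
      constructor
      · exact Or.inl
      · rintro (hm | hm)
        · exact hm
        · exact absurd hc' (by rw [hm]; exact hcf)
    · -- nonzero cell: store the root label
      have hcell : pvCell field (x, y) = true := hcells.2 hz
      have hstep : pvStep field d (x, y) = pvStore d x y (pvClosest d x y) := if_neg hz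
      have p1 : pvProbe d (x + 1) y = none := by
        rw [hInv]
        refine if_neg ?_
        rintro ⟨-, hm⟩
        exact hnotinL (x + 1, y) (Or.inl (by omega)) hm
      have p3 : pvProbe d x (y + 1) = none := by
        rw [hInv]
        refine if_neg ?_
        rintro ⟨-, hm⟩
        exact hnotinL (x, y + 1) (Or.inr ⟨rfl, by omega⟩) hm
      have p2 : pvProbe d (x - 1) y =
          if pvCell field (x - 1, y) = true then some (pvRootC field (x - 1) y) else none := by
        rw [hInv]
        by_cases hA : pvCell field (x - 1, y) = true
        · rw [if_pos ⟨hA, hmemL _ (pvCell_mem_coords field _ hA) (Or.inl (by omega))⟩, if_pos hA]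
        · rw [if_neg (fun hc => hA hc.1), if_neg hA]
      have p4 : pvProbe d x (y - 1) =
          if pvCell field (x, y - 1) = true then some (pvRootC field x (y - 1)) else none := by
        rw [hInv]
        by_cases hB : pvCell field (x, y - 1) = true
        · rw [if_pos ⟨hB, hmemL _ (pvCell_mem_coords field _ hB) (Or.inr ⟨rfl, by omega⟩)⟩,
            if_pos hB]
        · rw [if_neg (fun hc => hB hc.1), if_neg hB]
      have hclosest : pvClosest d x y = pvRootC field x y := by
        rw [pvRootC_rec field x y hx hy]
        by_cases hA : pvCell field (x - 1, y) = true
        · rw [if_pos hA] at p2 ⊢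
          simp [pvClosest, p1, p2]
        · rw [if_neg hA] at p2 ⊢
          by_cases hB : pvCell field (x, y - 1) = true
          · rw [if_pos hB] at p4 ⊢
            simp [pvClosest, p1, p2, p3, p4]
          · rw [if_neg hB] at p4 ⊢
            simp [pvClosest, p1, p2, p3, p4]
      rw [hstep, hclosest]
      refine ih (L ++ [(x, y)]) _ happ ?_ ?_
      · -- the invariant after the store
        intro x' y'
        rw [pvProbe_store]
        by_cases hxy : x' = x ∧ y' = y
        · obtain ⟨rfl, rfl⟩ := hxy
          rw [if_pos ⟨rfl, rfl⟩,
            if_pos ⟨hcell, List.mem_append_right _ (List.mem_singleton.2 rfl)⟩]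
        · rw [if_neg hxy, hInv x' y']
          refine if_congr (and_congr_right fun _ => ?_) rfl rfl
          simp only [List.mem_append, List.mem_singleton, Prod.mk.injEq]
          constructor
          · exact Or.inl
          · rintro (hm | hm)
            · exact hm
            · exact absurd hm hxy
      · -- well-formedness after the store
        refine ⟨PySem.Dict.nodup_keys_insert _ _ _ hWf.1, ?_⟩
        intro x' row hrow
        unfold pvStore at hrow
        rw [PySem.Dict.get?_insert] at hrow
        by_cases hx' : x' = x
        · rw [if_pos hx'] at hrow
          cases hrow
          refine PySem.Dict.nodup_keys_insert _ _ _ ?_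
          rw [PySem.Dict.getD_eq_get?_getD]
          cases hg : PySem.Dict.get? d x with
          | none => exact PySem.Dict.nodup_keys_empty
          | some r => exact hWf.2 x r hg
        · rw [if_neg hx'] at hrow
          exact hWf.2 _ _ hrow

-- the dict A's loop produces, characterised
lemma pvDict_char (field : List (List Int)) (x y : Int) :
    pvProbe ((pvCoords field).foldl (pvStep field) PySem.Dict.empty) x y =
      if pvCell field (x, y) = true then some (pvRootC field x y) else none := by
  have init : pvInv field PySem.Dict.empty [] := by
    intro x y
    rw [pvProbe_empty]
    exact (if_neg (by simp)).symm
  have initWf : pvWf PySem.Dict.empty := by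
    refine ⟨PySem.Dict.nodup_keys_empty, ?_⟩
    intro x row hrow
    rw [PySem.Dict.get?_empty] at hrow
    cases hrow
  have := (pvLoop field (pvCoords field) [] PySem.Dict.empty (by simp) init initWf).1 x y
  rw [this]
  refine if_congr ⟨fun h' => h'.1, fun h' => ⟨h', pvCell_mem_coords field _ h'⟩⟩ rfl rfl

lemma pvDict_wf (field : List (List Int)) :
    pvWf ((pvCoords field).foldl (pvStep field) PySem.Dict.empty) := by
  have init : pvInv field PySem.Dict.empty [] := by
    intro x y
    rw [pvProbe_empty]
    exact (if_neg (by simp)).symm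
  have initWf : pvWf PySem.Dict.empty := by
    refine ⟨PySem.Dict.nodup_keys_empty, ?_⟩
    intro x row hrow
    rw [PySem.Dict.get?_empty] at hrow
    cases hrow
  exact (pvLoop field (pvCoords field) [] PySem.Dict.empty (by simp) init initWf).2


-- a top-left corner of a ship: the quantity B counts
def pvCorner (field : List (List Int)) (q : Int × Int) : Prop :=
  pvCell field q = true ∧ pvCell field (q.1 - 1, q.2) = false ∧
    pvCell field (q.1, q.2 - 1) = false

lemma pvRoots_iff_corner (field : List (List Int)) (q : Int × Int) :
    (∃ x y, pvCell field (x, y) = true ∧ pvRootC field x y = q) ↔ pvCorner field q := by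
  constructor
  · rintro ⟨x, y, hc, rfl⟩
    exact pvRootC_corner field x y hc
  · rintro ⟨h1, h2, h3⟩
    refine ⟨q.1, q.2, h1, ?_⟩
    have hn := (pvCell_iff field q).1 h1
    exact pvRootC_fixed field q.1 q.2 hn.1 hn.2.2.1 h2 h3

-- A's collection loop over the nested dict's items is Set.update with all stored points
lemma pvShips_fold (l : List (Int × PySem.Dict Int (Int × Int))) (s0 : PySem.Set (Int × Int)) :
    l.foldl (fun s xr => xr.2.items.foldl (fun s yp => PySem.Set.add s yp.2) s) s0 =
      PySem.Set.update s0 (l.flatMap (fun xr => xr.2.items.map (·.2))) := by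
  induction l generalizing s0 with
  | nil => rfl
  | cons a l ih =>
    rw [List.foldl_cons, ih, List.flatMap_cons]
    unfold PySem.Set.update
    rw [List.foldl_append, List.foldl_map]

-- the stored points are exactly the probe-able ones
lemma pvMem_vals (d : PySem.Dict Int (PySem.Dict Int (Int × Int))) (hwf : pvWf d)
    (q : Int × Int) :
    q ∈ d.items.flatMap (fun xr => xr.2.items.map (·.2)) ↔ ∃ x y, pvProbe d x y = some q := by
  simp only [List.mem_flatMap, List.mem_map]
  constructor
  · rintro ⟨⟨x, row⟩, hmem, ⟨y, v⟩, hyv, rfl⟩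
    refine ⟨x, y, ?_⟩
    unfold pvProbe
    rw [PySem.Dict.getD_eq_get?_getD]
    have hg : d.get? x = some row := (PySem.Dict.get?_eq_some_iff_mem_items d x row hwf.1).2 hmem
    rw [hg]
    simpa using (PySem.Dict.get?_eq_some_iff_mem_items row y v (hwf.2 x row hg)).2 hyv
  · rintro ⟨x, y, hp⟩
    unfold pvProbe at hp
    rw [PySem.Dict.getD_eq_get?_getD] at hp
    cases hg : d.get? x with
    | none => rw [hg] at hp; simp [PySem.Dict.get?_empty] at hp
    | some row =>
      rw [hg] at hp
      simp only [Option.getD_some] at hp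
      exact ⟨(x, row), (PySem.Dict.get?_eq_some_iff_mem_items d x row hwf.1).1 hg,
        (y, q), (PySem.Dict.get?_eq_some_iff_mem_items row y q (hwf.2 x row hg)).1 hp, rfl⟩

-- B's cell set holds exactly the nonzero coordinates
lemma pvMem_cells (field : List (List Int)) (q : Int × Int) :
    q ∈ PySem.Set.ofList
      ((PySem.List.pyRange 0 (PySem.List.len field) 1).flatMap (fun x =>
        (PySem.List.pyRange 0 (PySem.List.len (PySem.List.pyGetD field x [])) 1).filterMap (fun y =>
          if PySem.List.pyGetD (PySem.List.pyGetD field x []) y 0 ≠ 0 then some (x, y) else none)))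
      ↔ pvCell field q = true := by
  rw [PySem.Set.mem_ofList]
  obtain ⟨x0, y0⟩ := q
  simp only [List.mem_flatMap, List.mem_filterMap, PySem.List.mem_pyRange_one]
  rw [pvCell_iff]
  constructor
  · rintro ⟨x, hx, y, hy, hsome⟩
    by_cases hnz : PySem.List.pyGetD (PySem.List.pyGetD field x []) y 0 ≠ 0
    · rw [if_pos hnz] at hsome
      obtain ⟨rfl, rfl⟩ : x = x0 ∧ y = y0 := by
        cases hsome; exact ⟨rfl, rfl⟩
      exact ⟨hx.1, hx.2, hy.1, hy.2, hnz⟩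
    · rw [if_neg hnz] at hsome
      cases hsome
  · rintro ⟨h1, h2, h3, h4, h5⟩
    exact ⟨x0, ⟨h1, h2⟩, y0, ⟨h3, h4⟩, if_pos h5⟩


-- A's value in closed form
lemma pvA_val (field : List (List Int)) :
    get_ships_amount field =
      PySem.Set.len (PySem.Set.update PySem.Set.empty
        (((pvCoords field).foldl (pvStep field) PySem.Dict.empty).items.flatMap
          (fun xr => xr.2.items.map (·.2)))) := by
  unfold get_ships_amount
  simp only [pvShips_fold]
  rw [pvCoords, List.foldl_flatMap]
  simp only [List.foldl_map]
  rfl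

-- ===== VERDICT (by name: the statement is the Claim_ definition above) =====
theorem get_ships_amount_spec : Claim_equal_get_ships_amount := by
  intro field _
  unfold Spec_get_ships_amount
  have hd := pvDict_char field
  have hwf := pvDict_wf field
  rw [pvA_val field]
  set cl := ((PySem.List.pyRange 0 (PySem.List.len field) 1).flatMap (fun x =>
      (PySem.List.pyRange 0 (PySem.List.len (PySem.List.pyGetD field x [])) 1).filterMap (fun y =>
        if PySem.List.pyGetD (PySem.List.pyGetD field x []) y 0 ≠ 0 then some (x, y) else none)))
    with hcl
  set cells : PySem.Set (Int × Int) := PySem.Set.ofList cl with hcells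
  set pred : Int × Int → Bool := (fun c =>
      !(PySem.Set.contains cells (c.1 - 1, c.2)) && !(PySem.Set.contains cells (c.1, c.2 - 1)))
    with hpreddef
  have hBval : get_ships_amount_alt field = ((cells.countP pred : Nat) : Int) := rfl
  set S := PySem.Set.update PySem.Set.empty
      (((pvCoords field).foldl (pvStep field) PySem.Dict.empty).items.flatMap
        (fun xr => xr.2.items.map (·.2))) with hS
  set K := cells.filter pred with hK
  have hSnodup : S.Nodup := PySem.Set.nodup_update _ _ List.nodup_nil
  have hcellsmem : ∀ c, c ∈ cells ↔ pvCell field c = true := fun c => pvMem_cells field c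
  have hSmem : ∀ q, q ∈ S ↔ pvCorner field q := by
    intro q
    rw [hS, PySem.Set.mem_update, ← pvRoots_iff_corner field q]
    rw [pvMem_vals _ hwf q]
    constructor
    · rintro (hq | ⟨x, y, hp⟩)
      · simp [PySem.Set.empty] at hq
      · rw [hd] at hp
        by_cases hc : pvCell field (x, y) = true
        · rw [if_pos hc] at hp
          exact ⟨x, y, hc, Option.some.inj hp⟩
        · rw [if_neg hc] at hp
          cases hp
    · rintro ⟨x, y, hc, hr⟩
      refine Or.inr ⟨x, y, ?_⟩
      rw [hd, if_pos hc, hr]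
  have hpred : ∀ q, pred q = true ↔
      (pvCell field (q.1 - 1, q.2) = false ∧ pvCell field (q.1, q.2 - 1) = false) := by
    intro q
    have c1 : PySem.Set.contains cells (q.1 - 1, q.2) = true ↔
        pvCell field (q.1 - 1, q.2) = true :=
      (PySem.Set.contains_iff _ _).trans (hcellsmem _)
    have c2 : PySem.Set.contains cells (q.1, q.2 - 1) = true ↔
        pvCell field (q.1, q.2 - 1) = true :=
      (PySem.Set.contains_iff _ _).trans (hcellsmem _)
    rw [hpreddef]
    simp only [Bool.and_eq_true, Bool.not_eq_true']
    constructor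
    · rintro ⟨h1, h2⟩
      refine ⟨?_, ?_⟩
      · cases hcv : pvCell field (q.1 - 1, q.2) with
        | false => rfl
        | true => exact absurd (c1.2 hcv) (by rw [h1]; exact Bool.false_ne_true)
      · cases hcv : pvCell field (q.1, q.2 - 1) with
        | false => rfl
        | true => exact absurd (c2.2 hcv) (by rw [h2]; exact Bool.false_ne_true)
    · rintro ⟨h1, h2⟩
      refine ⟨?_, ?_⟩
      · cases hcv : cells.contains (q.1 - 1, q.2) with
        | false => rfl
        | true => exact absurd (c1.1 hcv) (by rw [h1]; exact Bool.false_ne_true)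
      · cases hcv : cells.contains (q.1, q.2 - 1) with
        | false => rfl
        | true => exact absurd (c2.1 hcv) (by rw [h2]; exact Bool.false_ne_true)
  have hKnodup : K.Nodup := (PySem.Set.nodup_ofList cl).filter pred
  have hKmem : ∀ q, q ∈ K ↔ pvCorner field q := by
    intro q
    rw [hK, List.mem_filter]
    unfold pvCorner
    rw [← hpred q]
    constructor
    · rintro ⟨h1, h2⟩; exact ⟨(hcellsmem q).1 h1, h2⟩
    · rintro ⟨h1, h2⟩; exact ⟨(hcellsmem q).2 h1, h2⟩
  have hperm : S.Perm K :=
    (List.perm_ext_iff_of_nodup hSnodup hKnodup).2 (fun q => (hSmem q).trans (hKmem q).symm)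
  rw [hBval]
  have hlenS : PySem.Set.len S = ((S.length : Nat) : Int) := by
    simp [PySem.Set.len]
  rw [hlenS, hperm.length_eq, List.countP_eq_length_filter]
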